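/- GENERATED by mk_final_copies.py from the proof of the farm's unit `start_decoder.C9d` (farm:start_decoder.C9d.1: Proof.lean) as the
   re-elaboration sweep compiled it — do not edit. -/
import Asan.CheckWalk
import Vorbis.Spec.Units.start_decoder_C9d

open X86 X86.User Asan Vorbis Vorbis.Spec Vorbis.Spec.StartDecoder

set_option maxRecDepth 100000
set_option maxHeartbeats 4000000

namespace Vorbis.Spec.start_decoder_C9d

/-- The epilogue's assertion at a state `s` with the memory and the registers of the stub's cut point `v` (a `jmp` in between). -/
theorem atERR_of_jmp {u₀ : State} {g : Ghost} {A : Arena × List Obj} {v s : State} {pc : Word} (hfr : Frame u₀ g pc A v)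
    (hhand : g.Hand A) (hrax : v.reg .rax = 0) (hfail : Failed g.len g.f (g.Live A) A v.mem) (hrip : s.rip = pc_ERR)
    (hmem : s.mem = v.mem) (hrsp : s.reg .rsp = v.reg .rsp) (hraxs : s.reg .rax = v.reg .rax) (hinv : abiInv s) :
    AtERR u₀ g s := by
  refine ⟨A, ?_⟩
  refine
    { frame :=
        { entry := hfr.entry
          rip := hrip
          rsp := by rw [hrsp]; exact hfr.rsp
          shadowIdx := by rw [hmem]; exact hfr.shadowIdx
          saved_rbx := by rw [hmem]; exact hfr.saved_rbx
          saved_rbp := by rw [hmem]; exact hfr.saved_rbp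
          saved_r12 := by rw [hmem]; exact hfr.saved_r12
          saved_r13 := by rw [hmem]; exact hfr.saved_r13
          saved_r14 := by rw [hmem]; exact hfr.saved_r14
          saved_r15 := by rw [hmem]; exact hfr.saved_r15
          saved_ra := by rw [hmem]; exact hfr.saved_ra
          code := by rw [hmem]; exact hfr.code
          inv := hinv
          shadow := by rw [hmem]; exact hfr.shadow
          offText := hfr.offText
          ext := hfr.ext
          callers := hfr.callers
          sh7 := by rw [hmem]; exact hfr.sh7
          same := by rw [hmem]; exact hfr.same }
      hand := hhand
      result := ?_ }
  left
  refine ⟨?_, ?_⟩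
  · rw [hraxs, hrax]
    rfl
  · rw [hmem]
    exact hfail

/-- One of the two stubs' `jmp 113b22`: from the return address `pc` of `call error` to the epilogue, nothing written. -/
theorem c9d_jmp (Lay : Layout) (hLay : Lay.hi = 0x1000000) (μ : Microarch) (hμ : UserX.MicroOK μ) (u₀ : State)
    (hcode : HasCodeNat Lay u₀ Vorbis.L.start_decoder.entry Vorbis.Code.code_start_decoder.nat Vorbis.L.start_decoder.size)
    (g : Ghost) (A : Arena × List Obj) (v : State) (pc : Word)
    (hpc : pc = Vorbis.L.start_decoder.cut147 ∨ pc = Vorbis.L.start_decoder.cut148) (hfr : Frame u₀ g pc A v)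
    (hhand : g.Hand A) (hrax : v.reg .rax = 0) (hfail : Failed g.len g.f (g.Live A) A v.mem) :
    ReachVia Lay μ WayInv v (fun w => AtERR u₀ g w) := by
  have he := hfr.entry
  v_entry he
  simp only [depth] at he_room he_stack
  have w_rip := hfr.rip
  have w_eq : Mem.EqOn Vorbis.L.textLo Vorbis.L.textHi u₀.mem v.mem := hfr.code
  have hdf : v.flags .df = false := (show abiInv _ from hfr.inv).1
  have hmx : v.mxcsr &&& 0x1F80 = 0x1F80 := (show abiInv _ from hfr.inv).2
  have hsse := Vorbis.sseOK_of_abiInv hfr.inv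
  rcases hpc with rfl | rfl
  · u_walk hcode [hμ.vendor] until [pc_ERR] span [Vorbis.L.textLo, Vorbis.L.textHi] side (v_side)
    apply ReachVia.done
    exact atERR_of_jmp hfr hhand hrax hfail w_rip w_mem (w_kept.get .rsp rfl) (w_kept.get .rax rfl) (by v_inv)
  · u_walk hcode [hμ.vendor] until [pc_ERR] span [Vorbis.L.textLo, Vorbis.L.textHi] side (v_side)
    apply ReachVia.done
    exact atERR_of_jmp hfr hhand hrax hfail w_rip w_mem (w_kept.get .rsp rfl) (w_kept.get .rax rfl) (by v_inv)

end Vorbis.Spec.start_decoder_C9d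

theorem Vorbis.Spec.Worked.start_decoder_C9d_ok : Vorbis.Spec.start_decoder_C9d.Statement := by
  intro Lay hLay μ hμ u₀ hcode g v hat
  obtain ⟨A, h⟩ := hat
  rcases h.frame with hf | hf
  · exact Vorbis.Spec.start_decoder_C9d.c9d_jmp Lay hLay μ hμ u₀ hcode g A v _ (Or.inl rfl) hf h.hand h.rax h.failed
  · exact Vorbis.Spec.start_decoder_C9d.c9d_jmp Lay hLay μ hμ u₀ hcode g A v _ (Or.inr rfl) hf h.hand h.rax h.failed
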